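-- pv_equiv track=rewrite | github.com/insanepoet/Flared-UI | FlaredUI/Modules/DB/Schemas.py | load_exposed_ports
-- ===== SOURCE A (Python) =====
-- def load_exposed_ports(value):
--     # Parse the exposed_ports data to match the database format
--     if not value:
--         return {}
--
--     exposed_ports = {}
--     for entry in value:
--         protocol = entry.get('protocol')
--         port = entry.get('port')
--         if protocol and port:
--             exposed_ports.setdefault(protocol, []).append(port)
--     return exposed_ports
-- ===== SOURCE B (Python) =====
-- def load_exposed_ports(value):
--     if not value:
--         return {}
--     pairs = [(e.get('protocol'), e.get('port')) for e in value
--              if e.get('protocol') and e.get('port')]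
--     protocols = list(dict.fromkeys(p for p, _ in pairs))
--     return {p: [q for p2, q in pairs if p2 == p] for p in protocols}
-- ===== Notes on version B (the rewrite author's own statement) =====
-- stated objective: alternative
-- what changed: Replaces the incremental setdefault-append accumulation with a collect-filter decomposition: extract the valid (protocol, port) pairs once, dedup the protocols in first-occurrence order, then build each group by filtering the pair list per protocol.
import Mathlib
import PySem

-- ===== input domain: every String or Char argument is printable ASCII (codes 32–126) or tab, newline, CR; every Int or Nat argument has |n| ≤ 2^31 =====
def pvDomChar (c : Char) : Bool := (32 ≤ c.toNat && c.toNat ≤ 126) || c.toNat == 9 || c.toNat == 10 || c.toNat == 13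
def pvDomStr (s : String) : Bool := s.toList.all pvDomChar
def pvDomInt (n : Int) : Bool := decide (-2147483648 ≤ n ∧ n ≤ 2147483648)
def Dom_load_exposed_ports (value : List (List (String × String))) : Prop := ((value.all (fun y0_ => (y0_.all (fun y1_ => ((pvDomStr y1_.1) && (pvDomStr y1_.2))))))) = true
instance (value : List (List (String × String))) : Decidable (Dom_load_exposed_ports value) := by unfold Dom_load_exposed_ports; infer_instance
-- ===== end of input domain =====

-- B replaces A's incremental setdefault-append accumulation with a collect pairs / dedup protocols / filter-per-protocol decomposition (alternative, same result).


-- ===== PORT A =====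
-- one loop iteration of A: protocol = entry.get('protocol'); port = entry.get('port');
-- if protocol and port: exposed_ports.setdefault(protocol, []).append(port)
def pvStepA (d : PySem.Dict String (List String)) (entry : List (String × String)) :
    PySem.Dict String (List String) :=
  let e := PySem.Dict.ofList entry
  match e.get? "protocol", e.get? "port" with
  | some protocol, some port =>
      if protocol ≠ "" ∧ port ≠ "" then d.modify protocol [] (· ++ [port]) else d
  | _, _ => d

def load_exposed_ports (value : List (List (String × String))) : List (String × List String) :=
  if value = [] then []
  else (value.foldl pvStepA PySem.Dict.empty).items

-- ===== PORT B =====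
-- pairs = [(e.get('protocol'), e.get('port')) for e in value if e.get('protocol') and e.get('port')]
def pvPairs (value : List (List (String × String))) : List (String × String) :=
  value.filterMap (fun entry =>
    let e := PySem.Dict.ofList entry
    match e.get? "protocol", e.get? "port" with
    | some protocol, some port =>
        if protocol ≠ "" ∧ port ≠ "" then some (protocol, port) else none
    | _, _ => none)

-- protocols = list(dict.fromkeys(...)); {p: [q for p2, q in pairs if p2 == p] for p in protocols}
def load_exposed_ports_alt (value : List (List (String × String))) : List (String × List String) :=
  if value = [] then []
  else
    let pairs := pvPairs value
    (PySem.List.dedup (pairs.map (·.1))).map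
      (fun p => (p, (pairs.filter (fun pr => pr.1 == p)).map (·.2)))

-- ===== PRECONDITION & SPEC =====
def Spec_load_exposed_ports (value : List (List (String × String))) (out : List (String × List String)) : Prop := out = load_exposed_ports_alt value
instance (value : List (List (String × String))) (out : List (String × List String)) : Decidable (Spec_load_exposed_ports value out) := by unfold Spec_load_exposed_ports; infer_instance

-- ===== CLAIM (what is proved, stated in full; the proofs are below) =====
def Claim_equal_load_exposed_ports : Prop := ∀ (value : List (List (String × String))), Dom_load_exposed_ports value → Spec_load_exposed_ports value (load_exposed_ports value)

-- ===== LEMMAS AND PROOFS =====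

-- A's filtered loop over `value` is the grouping loop over the extracted pair list.
theorem pvFoldA_eq_fold_pairs (value : List (List (String × String)))
    (d : PySem.Dict String (List String)) :
    value.foldl pvStepA d =
      (pvPairs value).foldl (fun d pr => d.modify pr.1 [] (· ++ [pr.2])) d := by
  induction value generalizing d with
  | nil => rfl
  | cons e rest ih =>
      cases h1 : (PySem.Dict.ofList e).get? "protocol" with
      | none =>
          have hs : pvStepA d e = d := by simp [pvStepA, h1]
          have hp : pvPairs (e :: rest) = pvPairs rest := by simp [pvPairs, h1]
          rw [List.foldl_cons, hs, hp]; exact ih d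
      | some protocol =>
          cases h2 : (PySem.Dict.ofList e).get? "port" with
          | none =>
              have hs : pvStepA d e = d := by simp [pvStepA, h1, h2]
              have hp : pvPairs (e :: rest) = pvPairs rest := by simp [pvPairs, h1, h2]
              rw [List.foldl_cons, hs, hp]; exact ih d
          | some port =>
              by_cases hpq : protocol ≠ "" ∧ port ≠ ""
              · have hs : pvStepA d e = d.modify protocol [] (· ++ [port]) := by
                  simp [pvStepA, h1, h2, hpq]
                have hp : pvPairs (e :: rest) = (protocol, port) :: pvPairs rest := by
                  simp [pvPairs, h1, h2, hpq]
                rw [List.foldl_cons, hs, hp, List.foldl_cons]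
                exact ih _
              · have hs : pvStepA d e = d := by simp [pvStepA, h1, h2, hpq]
                have hp : pvPairs (e :: rest) = pvPairs rest := by simp [pvPairs, h1, h2, hpq]
                rw [List.foldl_cons, hs, hp]; exact ih d

theorem load_exposed_ports_eq_alt (value : List (List (String × String))) :
    load_exposed_ports value = load_exposed_ports_alt value := by
  unfold load_exposed_ports load_exposed_ports_alt
  by_cases hv : value = []
  · simp [hv]
  · simp only [if_neg hv]
    rw [pvFoldA_eq_fold_pairs]
    rw [PySem.Dict.items_eq_map_keys _
      (by
        have := PySem.Dict.nodup_keys_foldl_modify_key (pvPairs value)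
          (fun pr : String × String => pr.1) ([] : List String)
          (fun _ pr => (· ++ [pr.2])) PySem.Dict.empty
          (by simp)
        simpa using this) ([] : List String)]
    have hkeys :
        ((pvPairs value).foldl (fun d pr => d.modify pr.1 [] (· ++ [pr.2]))
          PySem.Dict.empty).keys
          = PySem.List.dedup ((pvPairs value).map (·.1)) := by
      have := PySem.Dict.keys_foldl_modify_key (pvPairs value)
        (fun pr : String × String => pr.1) ([] : List String)
        (fun _ pr => (· ++ [pr.2])) PySem.Dict.empty
      simpa [PySem.Dict.keys_empty, PySem.Set.update_nil_left,
        PySem.List.dedup_eq_ofList] using this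
    rw [hkeys]
    refine List.map_congr_left (fun p _ => ?_)
    have := PySem.Dict.getD_foldl_modify_append (pvPairs value)
      (PySem.Dict.empty (κ := String) (ν := List String)) p
    simp only [PySem.Dict.getD_empty, List.nil_append] at this
    simp [this]

-- ===== VERDICT (by name: the statement is the Claim_ definition above) =====
theorem load_exposed_ports_spec : Claim_equal_load_exposed_ports := by
  intro value _
  exact load_exposed_ports_eq_alt value
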